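-- pv_equiv track=rewrite | github.com/rohzzn/heartsmart_q | app.py | _preferred_id_field
-- ===== SOURCE A (Python) =====
-- from typing import Any, Dict, List, Optional, Set, Tuple, Union
--
-- JsonObj = Dict[str, Any]
--
-- def _preferred_id_field_from_keys(keys: Set[str]) -> Optional[str]:
--     for k in [
--         "Blinded ID",
--         "Subject ID",
--         "subject_id",
--         "Subject",
--         "ID",
--         "id",
--         "Sample ID (All)",
--     ]:
--         if k in keys:
--             return k
--     return None
--
-- def _preferred_id_field(rows: List[JsonObj]) -> Optional[str]:
--     if not rows:
--         return None
--     keys: Set[str] = set()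
--     for r in rows[:10]:
--         if isinstance(r, dict):
--             keys.update(r.keys())
--     return _preferred_id_field_from_keys(keys)
-- ===== SOURCE B (Python) =====
-- from typing import Any, Dict, List, Optional
--
-- JsonObj = Dict[str, Any]
--
-- _PRIORITY = [
--     "Blinded ID",
--     "Subject ID",
--     "subject_id",
--     "Subject",
--     "ID",
--     "id",
--     "Sample ID (All)",
-- ]
-- _RANK = {k: i for i, k in enumerate(_PRIORITY)}
--
-- def _preferred_id_field(rows: List[JsonObj]) -> Optional[str]:
--     best = len(_PRIORITY)
--     for r in rows[:10]:
--         if isinstance(r, dict):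
--             for k in r:
--                 i = _RANK.get(k)
--                 if i is not None and i < best:
--                     best = i
--     return _PRIORITY[best] if best < len(_PRIORITY) else None
-- ===== Notes on version B (the rewrite author's own statement) =====
-- stated objective: alternative
-- what changed: Replaces A's two-stage 'build a union set of keys, then scan the priority list' with a single pass over the first ten rows that folds the minimum priority rank of any key seen (via a precomputed key-to-rank map), returning the candidate at that rank; no key-union set and no candidate scan remain.
import Mathlib
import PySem

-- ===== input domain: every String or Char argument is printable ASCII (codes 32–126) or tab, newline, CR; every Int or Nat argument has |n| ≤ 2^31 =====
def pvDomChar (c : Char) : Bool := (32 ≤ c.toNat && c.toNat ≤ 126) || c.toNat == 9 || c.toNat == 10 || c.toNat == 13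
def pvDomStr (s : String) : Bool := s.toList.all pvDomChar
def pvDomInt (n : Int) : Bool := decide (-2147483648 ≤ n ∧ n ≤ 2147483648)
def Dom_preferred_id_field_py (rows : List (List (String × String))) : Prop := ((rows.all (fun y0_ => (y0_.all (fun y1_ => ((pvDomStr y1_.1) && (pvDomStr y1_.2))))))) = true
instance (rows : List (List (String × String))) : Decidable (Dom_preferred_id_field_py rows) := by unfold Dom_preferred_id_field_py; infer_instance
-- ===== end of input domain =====

-- B replaces A's key-union set + priority scan by a single pass folding the minimum priority rank of any key seen; return value only.
-- ===== PORT A =====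
-- for k in [...]: if k in keys: return k ; return None
def pvFromKeysA (cands : List String) (keys : PySem.Set String) : Option String :=
  match cands with
  | [] => none
  | k :: rest => if PySem.Set.contains keys k then some k else pvFromKeysA rest keys

def preferred_id_field_py (rows : List (List (String × String))) : Option String :=
  if rows = [] then none
  else
    -- keys = set(); for r in rows[:10]: keys.update(r.keys())   (rows are dicts by the type convention)
    let keys := (PySem.List.slice rows none (some 10)).foldl
      (fun s r => PySem.Set.update s ((PySem.Dict.mk r).keys)) PySem.Set.empty
    pvFromKeysA ["Blinded ID", "Subject ID", "subject_id", "Subject", "ID", "id", "Sample ID (All)"] keys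

-- ===== PORT B =====
def pvPriority : List String :=
  ["Blinded ID", "Subject ID", "subject_id", "Subject", "ID", "id", "Sample ID (All)"]

-- _RANK = {k: i for i, k in enumerate(_PRIORITY)}
def pvRank : PySem.Dict String Int :=
  PySem.Dict.mk ((PySem.List.enumerate pvPriority).map (fun p => (p.2, p.1)))

-- i = _RANK.get(k); if i is not None and i < best: best = i
def pvStep (best : Int) (k : String) : Int :=
  match pvRank.get? k with
  | some i => if i < best then i else best
  | none => best

def preferred_id_field_py_alt (rows : List (List (String × String))) : Option String :=
  -- best = len(_PRIORITY); for r in rows[:10]: for k in r: …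
  let best := (PySem.List.slice rows none (some 10)).foldl
    (fun b r => ((PySem.Dict.mk r).keys).foldl pvStep b) (pvPriority.length : Int)
  -- return _PRIORITY[best] if best < len(_PRIORITY) else None   (best is then a valid index, so pyGet? is exact)
  if best < (pvPriority.length : Int) then PySem.List.pyGet? pvPriority best else none

-- ===== PRECONDITION & SPEC =====
def Spec_preferred_id_field_py (rows : List (List (String × String))) (out : Option String) : Prop := out = preferred_id_field_py_alt rows
instance (rows : List (List (String × String))) (out : Option String) : Decidable (Spec_preferred_id_field_py rows out) := by unfold Spec_preferred_id_field_py; infer_instance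

-- ===== CLAIM (what is proved, stated in full; the proofs are below) =====
def Claim_equal_preferred_id_field_py : Prop := ∀ (rows : List (List (String × String))), Dom_preferred_id_field_py rows → Spec_preferred_id_field_py rows (preferred_id_field_py rows)

-- ===== LEMMAS AND PROOFS =====

-- all keys of the first-ten rows, in order
def pvAllKeys (l : List (List (String × String))) : List String :=
  l.flatMap (fun r => (PySem.Dict.mk r).keys)

-- membership in A's accumulated key set = membership in the concatenated key list
lemma pv_mem_keyfold (l : List (List (String × String))) (s : PySem.Set String) (k : String) :
    (k ∈ l.foldl (fun s r => PySem.Set.update s ((PySem.Dict.mk r).keys)) s) ↔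
      k ∈ s ∨ k ∈ pvAllKeys l := by
  induction l generalizing s with
  | nil => simp [pvAllKeys]
  | cons r rest ih =>
      rw [List.foldl_cons, ih]
      simp [pvAllKeys, PySem.Set.mem_update, or_assoc]

-- B's double fold = a single fold over the concatenated key list
lemma pv_fold_flat (l : List (List (String × String))) (b : Int) :
    l.foldl (fun b r => ((PySem.Dict.mk r).keys).foldl pvStep b) b
      = (pvAllKeys l).foldl pvStep b := by
  induction l generalizing b with
  | nil => rfl
  | cons r rest ih =>
      have hsplit : pvAllKeys (r :: rest) = (PySem.Dict.mk r).keys ++ pvAllKeys rest := by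
        simp [pvAllKeys]
      rw [List.foldl_cons, hsplit, List.foldl_append, ih]

lemma pv_step_le (b : Int) (k : String) : pvStep b k ≤ b := by
  unfold pvStep; cases h : pvRank.get? k with
  | none => exact le_refl b
  | some i => dsimp; split <;> omega

lemma pv_fold_le (ks : List String) (b : Int) : ks.foldl pvStep b ≤ b := by
  induction ks generalizing b with
  | nil => exact le_refl b
  | cons k rest ih => exact le_trans (ih (pvStep b k)) (pv_step_le b k)

-- the fold result is the initial value or the rank of some key in the list
lemma pv_fold_cases (ks : List String) (b : Int) :
    ks.foldl pvStep b = b ∨ ∃ k ∈ ks, pvRank.get? k = some (ks.foldl pvStep b) := by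
  induction ks generalizing b with
  | nil => exact Or.inl rfl
  | cons k rest ih =>
      rw [List.foldl_cons]
      rcases ih (pvStep b k) with h | ⟨k', hk', hr⟩
      · rw [h]; unfold pvStep
        cases hg : pvRank.get? k with
        | none => exact Or.inl rfl
        | some i =>
            dsimp; split
            · exact Or.inr ⟨k, List.mem_cons_self, by rw [hg]⟩
            · exact Or.inl rfl
      · exact Or.inr ⟨k', List.mem_cons_of_mem _ hk', hr⟩

-- minimality: the fold is ≤ the rank of every key in the list
lemma pv_fold_min (k : String) (i : Int) (hr : pvRank.get? k = some i) :
    ∀ (ks : List String) (b : Int), k ∈ ks → ks.foldl pvStep b ≤ i := by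
  intro ks
  induction ks with
  | nil => intro b hk; cases hk
  | cons k' rest ih =>
      intro b hk
      rw [List.foldl_cons]
      rcases List.mem_cons.1 hk with rfl | hmem
      · have hs : pvStep b k ≤ i := by unfold pvStep; rw [hr]; dsimp; split <;> omega
        exact le_trans (pv_fold_le rest _) hs
      · exact ih _ hmem

-- the literal rank dict: every hit names a priority index and its candidate
lemma pv_rank_sound (k : String) (i : Int) (hr : pvRank.get? k = some i) :
    0 ≤ i ∧ i < 7 ∧ PySem.List.pyGet? pvPriority i = some k := by
  have h : pvRank.get? k =
      (if "Blinded ID" == k then some (0:Int) else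
       if "Subject ID" == k then some 1 else
       if "subject_id" == k then some 2 else
       if "Subject" == k then some 3 else
       if "ID" == k then some 4 else
       if "id" == k then some 5 else
       if "Sample ID (All)" == k then some 6 else none) := by
    simp [pvRank, pvPriority, PySem.List.enumerate_cons, PySem.List.enumerate_nil,
      PySem.Dict.get?_mk_cons]
    rfl
  rw [h] at hr
  split_ifs at hr with h0 h1 h2 h3 h4 h5 h6
  all_goals first
    | exact Option.noConfusion hr
    | (injection hr with hi; subst hi;
       (first
         | (obtain rfl := eq_of_beq h0) | (obtain rfl := eq_of_beq h1)
         | (obtain rfl := eq_of_beq h2) | (obtain rfl := eq_of_beq h3)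
         | (obtain rfl := eq_of_beq h4) | (obtain rfl := eq_of_beq h5)
         | (obtain rfl := eq_of_beq h6));
       exact ⟨by decide, by decide, by decide⟩)

-- every priority candidate has its index as rank
lemma pv_rank_complete (c : String) (hc : c ∈ pvPriority) :
    ∃ i : Int, pvRank.get? c = some i ∧ 0 ≤ i ∧ i < 7 ∧
      PySem.List.pyGet? pvPriority i = some c := by
  simp only [pvPriority, List.mem_cons, List.not_mem_nil, or_false] at hc
  rcases hc with rfl | rfl | rfl | rfl | rfl | rfl | rfl
  · exact ⟨0, by decide, by decide, by decide, by decide⟩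
  · exact ⟨1, by decide, by decide, by decide, by decide⟩
  · exact ⟨2, by decide, by decide, by decide, by decide⟩
  · exact ⟨3, by decide, by decide, by decide, by decide⟩
  · exact ⟨4, by decide, by decide, by decide, by decide⟩
  · exact ⟨5, by decide, by decide, by decide, by decide⟩
  · exact ⟨6, by decide, by decide, by decide, by decide⟩

-- A's scan over the priority list, phrased over the key list
def pvScan (cands : List String) (ks : List String) : Option String :=
  match cands with
  | [] => none
  | c :: rest => if c ∈ ks then some c else pvScan rest ks

-- A's set-based scan = the key-list scan
lemma pv_scanA_eq (cands : List String) (l : List (List (String × String))) :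
    pvFromKeysA cands (l.foldl (fun s r => PySem.Set.update s ((PySem.Dict.mk r).keys)) PySem.Set.empty)
      = pvScan cands (pvAllKeys l) := by
  induction cands with
  | nil => rfl
  | cons c rest ih =>
      have hc : PySem.Set.contains
            (l.foldl (fun s r => PySem.Set.update s (PySem.Dict.mk r).keys) PySem.Set.empty) c
          = decide (c ∈ pvAllKeys l) := by
        rw [Bool.eq_iff_iff, PySem.Set.contains_iff, pv_mem_keyfold]
        simp [PySem.Set.empty]
      simp only [pvFromKeysA, pvScan, hc, ih, decide_eq_true_eq]

-- core: the min-rank fold, rendered as candidate-or-none, equals the priority scan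
lemma pv_core (ks : List String) :
    (if ks.foldl pvStep 7 < 7 then PySem.List.pyGet? pvPriority (ks.foldl pvStep 7) else none)
      = pvScan pvPriority ks := by
  obtain ⟨m, hm⟩ : ∃ m, ks.foldl pvStep 7 = m := ⟨_, rfl⟩
  rw [hm]
  have hle : m ≤ 7 := hm ▸ pv_fold_le ks 7
  rcases pv_fold_cases ks 7 with h7 | ⟨k, hk, hr⟩
  · -- nothing matched: no priority candidate is among the keys
    obtain rfl : m = 7 := by rw [← hm, h7]
    have hnone : ∀ c ∈ pvPriority, c ∉ ks := by
      intro c hc hcks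
      obtain ⟨i, hri, _, hi7, _⟩ := pv_rank_complete c hc
      have := pv_fold_min c i hri ks 7 hcks
      rw [hm] at this
      omega
    simp only [if_neg (by omega : ¬ (7:Int) < 7)]
    have : ∀ cands : List String, (∀ c ∈ cands, c ∉ ks) → pvScan cands ks = none := by
      intro cands
      induction cands with
      | nil => intro _; rfl
      | cons c rest ih =>
          intro h
          simp only [pvScan, if_neg (h c List.mem_cons_self), ih (fun c hc => h c (List.mem_cons_of_mem _ hc))]
    exact (this pvPriority hnone).symm
  · -- m is the rank of some key; the candidate at index m is the first match
    rw [hm] at hr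
    obtain ⟨h0, h7', hget⟩ := pv_rank_sound k m hr
    have hkm : k ∈ ks := hk
    have hmin : ∀ c ∈ pvPriority, c ∈ ks →
        ∀ i : Int, pvRank.get? c = some i → m ≤ i := by
      intro c _ hcks i hri
      rw [← hm]
      exact pv_fold_min c i hri ks 7 hcks
    have hnotbefore : ∀ (j : Int), 0 ≤ j → j < m →
        ∀ c, PySem.List.pyGet? pvPriority j = some c → c ∉ ks := by
      intro j hj0 hjm c hgc hcks
      have hcmem : c ∈ pvPriority := PySem.List.mem_of_pyGet?_eq_some _ hgc
      obtain ⟨i, hri, hi0, _, hgi⟩ := pv_rank_complete c hcmem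
      have : m ≤ i := hm ▸ pv_fold_min c i hri ks 7 hcks
      -- i = j since pyGet? at both indices yields c and pvPriority has no duplicates
      have hij : i = j := by
        have hlen : pvPriority.length = 7 := by decide
        have hi2 : i = ((i.toNat : Nat) : Int) := by omega
        have hj2 : j = ((j.toNat : Nat) : Int) := by omega
        rw [hi2, PySem.List.pyGet?_natCast] at hgi
        rw [hj2, PySem.List.pyGet?_natCast] at hgc
        have := List.getElem?_inj (xs := pvPriority) (by omega) (by decide)
          (hgi.trans hgc.symm)
        omega
      omega
    rw [if_pos (by omega : m < 7), hget]
    have hn : ∀ (j : Int) (c : String), 0 ≤ j → j < m →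
        PySem.List.pyGet? pvPriority j = some c → c ∉ ks :=
      fun j c a b hg => hnotbefore j a b c hg
    have hcase : m = 0 ∨ m = 1 ∨ m = 2 ∨ m = 3 ∨ m = 4 ∨ m = 5 ∨ m = 6 := by omega
    clear hnotbefore hmin hr hm hle h0 h7' hk
    rcases hcase with rfl | rfl | rfl | rfl | rfl | rfl | rfl
    · have hk' : k = "Blinded ID" := by
        have hx : PySem.List.pyGet? pvPriority 0 = some "Blinded ID" := by decide
        exact (Option.some.inj (hx.symm.trans hget)).symm
      subst hk'
      simp [pvScan, pvPriority,  hkm]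
    · have n0 := hn 0 "Blinded ID" (by omega) (by omega) (by decide)
      have hk' : k = "Subject ID" := by
        have hx : PySem.List.pyGet? pvPriority 1 = some "Subject ID" := by decide
        exact (Option.some.inj (hx.symm.trans hget)).symm
      subst hk'
      simp [pvScan, pvPriority, n0, hkm]
    · have n0 := hn 0 "Blinded ID" (by omega) (by omega) (by decide)
      have n1 := hn 1 "Subject ID" (by omega) (by omega) (by decide)
      have hk' : k = "subject_id" := by
        have hx : PySem.List.pyGet? pvPriority 2 = some "subject_id" := by decide
        exact (Option.some.inj (hx.symm.trans hget)).symm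
      subst hk'
      simp [pvScan, pvPriority, n0, n1, hkm]
    · have n0 := hn 0 "Blinded ID" (by omega) (by omega) (by decide)
      have n1 := hn 1 "Subject ID" (by omega) (by omega) (by decide)
      have n2 := hn 2 "subject_id" (by omega) (by omega) (by decide)
      have hk' : k = "Subject" := by
        have hx : PySem.List.pyGet? pvPriority 3 = some "Subject" := by decide
        exact (Option.some.inj (hx.symm.trans hget)).symm
      subst hk'
      simp [pvScan, pvPriority, n0, n1, n2, hkm]
    · have n0 := hn 0 "Blinded ID" (by omega) (by omega) (by decide)
      have n1 := hn 1 "Subject ID" (by omega) (by omega) (by decide)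
      have n2 := hn 2 "subject_id" (by omega) (by omega) (by decide)
      have n3 := hn 3 "Subject" (by omega) (by omega) (by decide)
      have hk' : k = "ID" := by
        have hx : PySem.List.pyGet? pvPriority 4 = some "ID" := by decide
        exact (Option.some.inj (hx.symm.trans hget)).symm
      subst hk'
      simp [pvScan, pvPriority, n0, n1, n2, n3, hkm]
    · have n0 := hn 0 "Blinded ID" (by omega) (by omega) (by decide)
      have n1 := hn 1 "Subject ID" (by omega) (by omega) (by decide)
      have n2 := hn 2 "subject_id" (by omega) (by omega) (by decide)
      have n3 := hn 3 "Subject" (by omega) (by omega) (by decide)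
      have n4 := hn 4 "ID" (by omega) (by omega) (by decide)
      have hk' : k = "id" := by
        have hx : PySem.List.pyGet? pvPriority 5 = some "id" := by decide
        exact (Option.some.inj (hx.symm.trans hget)).symm
      subst hk'
      simp [pvScan, pvPriority, n0, n1, n2, n3, n4, hkm]
    · have n0 := hn 0 "Blinded ID" (by omega) (by omega) (by decide)
      have n1 := hn 1 "Subject ID" (by omega) (by omega) (by decide)
      have n2 := hn 2 "subject_id" (by omega) (by omega) (by decide)
      have n3 := hn 3 "Subject" (by omega) (by omega) (by decide)
      have n4 := hn 4 "ID" (by omega) (by omega) (by decide)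
      have n5 := hn 5 "id" (by omega) (by omega) (by decide)
      have hk' : k = "Sample ID (All)" := by
        have hx : PySem.List.pyGet? pvPriority 6 = some "Sample ID (All)" := by decide
        exact (Option.some.inj (hx.symm.trans hget)).symm
      subst hk'
      simp [pvScan, pvPriority, n0, n1, n2, n3, n4, n5, hkm]

-- the empty-rows special case of A is vacuous for B
lemma pv_alt_nil : preferred_id_field_py_alt [] = none := by decide

theorem preferred_id_field_py_spec : Claim_equal_preferred_id_field_py := by
  intro rows _
  unfold Spec_preferred_id_field_py
  by_cases h : rows = []
  · subst h; rw [pv_alt_nil]; rfl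
  · unfold preferred_id_field_py preferred_id_field_py_alt
    simp only [h, if_false]
    have hlen : (pvPriority.length : Int) = 7 := by decide
    rw [pv_scanA_eq, pv_fold_flat, hlen, pv_core]
    rfl
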